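-- pv_equiv track=rewrite | github.com/Mas-AI-Official/daena | scripts/audit_dependencies.py | find_unused_modules
-- ===== SOURCE A (Python) =====
-- from typing import Dict, List, Set, Tuple
--
-- def find_unused_modules(modules: Dict[str, Dict], all_imports: Set[str]) -> List[str]:
--     """Find modules that are never imported"""
--     module_names = set(modules.keys())
--     used_modules = set()
--
--     for module_name, info in modules.items():
--         # Check if any import references this module
--         for imp in info["all_imports"]:
--             if imp in module_names:
--                 used_modules.add(imp)
--
--     unused = module_names - used_modules
--     # Filter out entry points (main.py, __init__.py, etc.)
--     unused = {m for m in unused if not any(m.endswith(x) for x in ['main', '__init__', 'setup', 'config'])}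
--
--     return sorted(unused)
-- ===== SOURCE B (Python) =====
-- from typing import Dict, List, Set
--
-- def find_unused_modules(modules: Dict[str, Dict], all_imports: Set[str]) -> List[str]:
--     """Find modules never imported, by a sorted two-pointer merge instead of set subtraction."""
--     names = sorted(set(modules))
--     imps = sorted({imp for info in modules.values() for imp in info["all_imports"]})
--     out = []
--     i = 0
--     for m in names:
--         while i < len(imps) and imps[i] < m:
--             i += 1
--         if (i == len(imps) or imps[i] != m) and \
--            not any(m.endswith(x) for x in ('main', '__init__', 'setup', 'config')):
--             out.append(m)
--     return out
-- ===== Notes on version B (the rewrite author's own statement) =====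
-- stated objective: alternative
-- what changed: B replaces A's hash-set membership pipeline (intersection accumulation, set difference, set comprehension, final sort) by a sort-then-merge algorithm: it sorts the distinct module names and the distinct imports once and emits the unused names with a single two-pointer merge scan, so the output is produced already in sorted order and no membership test against a set ever runs.
import Mathlib
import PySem

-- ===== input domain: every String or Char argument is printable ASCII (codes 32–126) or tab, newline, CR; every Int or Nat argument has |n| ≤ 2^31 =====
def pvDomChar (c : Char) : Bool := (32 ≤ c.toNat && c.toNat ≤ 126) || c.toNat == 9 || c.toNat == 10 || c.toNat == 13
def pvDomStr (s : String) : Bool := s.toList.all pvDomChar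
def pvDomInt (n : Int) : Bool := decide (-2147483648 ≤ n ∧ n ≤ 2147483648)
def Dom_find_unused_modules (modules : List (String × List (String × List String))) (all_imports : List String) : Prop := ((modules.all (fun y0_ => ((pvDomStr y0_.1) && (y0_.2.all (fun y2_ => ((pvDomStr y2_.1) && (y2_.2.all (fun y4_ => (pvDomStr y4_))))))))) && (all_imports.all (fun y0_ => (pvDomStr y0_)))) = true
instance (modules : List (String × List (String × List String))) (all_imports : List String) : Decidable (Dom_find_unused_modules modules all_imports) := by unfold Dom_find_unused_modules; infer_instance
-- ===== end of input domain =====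

-- B computes the unused modules by a sorted two-pointer merge of the distinct names against the
-- distinct imports, instead of A's set intersection/difference/comprehension; return value only.
-- ===== PORT A =====
def pvEntrySuffixes : List String := ["main", "__init__", "setup", "config"]

def find_unused_modules (modules : List (String × List (String × List String))) (all_imports : List String) : List String :=
  let module_names : PySem.Set String := PySem.Set.ofList (modules.map (fun p => p.1))
  let used_modules : PySem.Set String :=
    modules.foldl (fun used p =>
      ((PySem.Dict.get? ⟨p.2⟩ "all_imports").getD []).foldl
        (fun used imp => if PySem.Set.contains module_names imp then PySem.Set.add used imp else used)
        used)
      PySem.Set.empty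
  let unused := PySem.Set.diff module_names used_modules
  let unused2 := PySem.Set.ofList (unused.filter (fun m => !(pvEntrySuffixes.any (fun x => PySem.Str.endswith m x))))
  PySem.List.sorted unused2 (fun x => x) false

-- ===== PORT B =====
-- imports of one module entry (first-match assoc lookup, as both ports read the Python dict)
def pvImps (p : String × List (String × List String)) : List String :=
  (PySem.Dict.get? ⟨p.2⟩ "all_imports").getD []

-- the for-loop over names with the inner while advancing the pointer into the sorted imports:
-- the pointer is represented by the remaining suffix of imps, the while is a dropWhile
def pvMergeScan : List String → List String → List String
  | [], _ => []
  | m :: rest, imps =>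
    if (imps.dropWhile (fun i => decide (i < m))).head? ≠ some m ∧
        !(pvEntrySuffixes.any (fun x => PySem.Str.endswith m x))
    then m :: pvMergeScan rest (imps.dropWhile (fun i => decide (i < m)))
    else pvMergeScan rest (imps.dropWhile (fun i => decide (i < m)))

def find_unused_modules_alt (modules : List (String × List (String × List String))) (all_imports : List String) : List String :=
  let names := PySem.List.sorted (PySem.Set.ofList (modules.map (fun p => p.1))) (fun x => x) false
  let imps := PySem.List.sorted (PySem.Set.ofList (modules.flatMap pvImps)) (fun x => x) false
  pvMergeScan names imps

-- ===== PRECONDITION & SPEC =====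
-- Pre_ excludes dicts missing the "all_imports" key (A raises KeyError there) and association
-- lists with duplicate module names, on which the assoc-list reading of a Python dict is ambiguous.
def Pre_find_unused_modules (modules : List (String × List (String × List String))) (all_imports : List String) : Prop :=
  (modules.map (fun p => p.1)).Nodup ∧ ∀ p ∈ modules, "all_imports" ∈ p.2.map (fun q => q.1)
instance (modules : List (String × List (String × List String))) (all_imports : List String) : Decidable (Pre_find_unused_modules modules all_imports) := by unfold Pre_find_unused_modules; infer_instance

def pvWitness_find_unused_modules : (List (String × List (String × List String))) × List String :=
  ([("pkg.a", [("all_imports", ["os", "pkg.b"])]), ("pkg.b", [("all_imports", [])])], ["os"])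

def Spec_find_unused_modules (modules : List (String × List (String × List String))) (all_imports : List String) (out : List String) : Prop := out = find_unused_modules_alt modules all_imports
instance (modules : List (String × List (String × List String))) (all_imports : List String) (out : List String) : Decidable (Spec_find_unused_modules modules all_imports out) := by unfold Spec_find_unused_modules; infer_instance

-- ===== CLAIM (what is proved, stated in full; the proofs are below) =====
def Claim_equal_find_unused_modules : Prop := ∀ (modules : List (String × List (String × List String))) (all_imports : List String), Dom_find_unused_modules modules all_imports → Pre_find_unused_modules modules all_imports → Spec_find_unused_modules modules all_imports (find_unused_modules modules all_imports)

-- ===== LEMMAS AND PROOFS =====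
-- membership in A's inner accumulation loop
lemma mem_foldl_addIf (names : PySem.Set String) (imports : List String) (acc : PySem.Set String) (x : String) :
    x ∈ imports.foldl (fun used imp => if PySem.Set.contains names imp then PySem.Set.add used imp else used) acc ↔
      x ∈ acc ∨ (x ∈ imports ∧ x ∈ names) := by
  induction imports generalizing acc with
  | nil => simp
  | cons i t ih =>
    simp only [List.foldl_cons, ih, List.mem_cons]
    by_cases hi : i ∈ names
    · simp [PySem.Set.mem_add, hi]
      constructor
      · rintro ((h | rfl) | h)
        · exact Or.inl h
        · exact Or.inr ⟨Or.inl rfl, hi⟩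
        · exact Or.inr ⟨Or.inr h.1, h.2⟩
      · rintro (h | ⟨(rfl | h), hn⟩)
        · exact Or.inl (Or.inl h)
        · exact Or.inl (Or.inr rfl)
        · exact Or.inr ⟨h, hn⟩
    · have : PySem.Set.contains names i = false := by
        cases h : PySem.Set.contains names i
        · rfl
        · exact absurd ((PySem.Set.contains_iff _ _).mp h) hi
      simp only [this, Bool.false_eq_true, if_false]
      constructor
      · rintro (h | h)
        · exact Or.inl h
        · exact Or.inr ⟨Or.inr h.1, h.2⟩
      · rintro (h | ⟨(rfl | h), hn⟩)
        · exact Or.inl h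
        · exact absurd hn hi
        · exact Or.inr ⟨h, hn⟩

-- membership in A's used_modules fold
lemma mem_used_foldl (names : PySem.Set String) (modules : List (String × List (String × List String))) (acc : PySem.Set String) (x : String) :
    x ∈ modules.foldl (fun used p => (pvImps p).foldl
        (fun used imp => if PySem.Set.contains names imp then PySem.Set.add used imp else used) used) acc ↔
      x ∈ acc ∨ ((∃ p ∈ modules, x ∈ pvImps p) ∧ x ∈ names) := by
  induction modules generalizing acc with
  | nil => simp
  | cons p t ih =>
    simp only [List.foldl_cons, ih, mem_foldl_addIf, List.mem_cons]
    constructor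
    · rintro ((h | h) | h)
      · exact Or.inl h
      · exact Or.inr ⟨⟨p, Or.inl rfl, h.1⟩, h.2⟩
      · obtain ⟨⟨q, hq, hx⟩, hn⟩ := h
        exact Or.inr ⟨⟨q, Or.inr hq, hx⟩, hn⟩
    · rintro (h | ⟨⟨q, (rfl | hq), hx⟩, hn⟩)
      · exact Or.inl (Or.inl h)
      · exact Or.inl (Or.inr ⟨hx, hn⟩)
      · exact Or.inr ⟨⟨q, hq, hx⟩, hn⟩

-- the merge scan emits a sublist of its name list
lemma mergeScan_sublist (names imps : List String) : (pvMergeScan names imps).Sublist names := by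
  induction names generalizing imps with
  | nil => simp [pvMergeScan]
  | cons m rest ih =>
    unfold pvMergeScan
    split
    · exact (ih _).cons₂ m
    · exact (ih _).cons m

-- after dropWhile (< m), membership of any x ≥ m is unchanged
lemma mem_dropWhile_of_le (imps : List String) (m x : String) (hx : m ≤ x) :
    x ∈ imps.dropWhile (fun i => decide (i < m)) ↔ x ∈ imps := by
  constructor
  · exact fun h => (List.dropWhile_sublist _).mem h
  · intro h
    rw [← List.takeWhile_append_dropWhile (p := fun i => decide (i < m)) (l := imps)] at h
    rcases List.mem_append.mp h with h | h
    · have hx' := List.mem_takeWhile_imp h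
      rw [decide_eq_true_eq] at hx'
      exact absurd hx (not_le.mpr hx')
    · exact h

-- on a sorted imps, "head of the advanced suffix equals m" decides membership of m
lemma head_dropWhile_eq_iff_mem (imps : List String) (m : String) (hs : imps.Pairwise (· ≤ ·)) :
    (imps.dropWhile (fun i => decide (i < m))).head? = some m ↔ m ∈ imps := by
  have hmem := mem_dropWhile_of_le imps m m le_rfl
  constructor
  · intro h
    exact hmem.mp (List.mem_of_mem_head? h)
  · intro h
    have h' := hmem.mpr h
    cases hd : imps.dropWhile (fun i => decide (i < m)) with
    | nil => rw [hd] at h'; exact absurd h' (List.not_mem_nil)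
    | cons a t =>
      have ha : ¬ (a < m) := by
        have := List.head?_dropWhile_not (p := fun i => decide (i < m)) (l := imps)
        rw [hd] at this
        simpa using this
      have hpw : (a :: t).Pairwise (· ≤ ·) := hs.sublist (hd ▸ List.dropWhile_sublist _)
      rw [hd] at h'
      rcases List.mem_cons.mp h' with rfl | hmt
      · rfl
      · have ham : a ≤ m := (List.pairwise_cons.mp hpw).1 m hmt
        have : a = m := le_antisymm ham (not_lt.mp ha)
        rw [this]; rfl

-- membership in the merge scan, for strictly increasing names and sorted imps
lemma mem_mergeScan (names imps : List String) (hn : names.Pairwise (· < ·)) (hi : imps.Pairwise (· ≤ ·)) (x : String) :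
    x ∈ pvMergeScan names imps ↔
      x ∈ names ∧ x ∉ imps ∧ ¬(pvEntrySuffixes.any (fun s => PySem.Str.endswith x s)) = true := by
  induction names generalizing imps with
  | nil => simp [pvMergeScan]
  | cons m rest ih =>
    have hrest : rest.Pairwise (· < ·) := (List.pairwise_cons.mp hn).2
    have hmlt : ∀ y ∈ rest, m < y := (List.pairwise_cons.mp hn).1
    have hi' : (imps.dropWhile (fun i => decide (i < m))).Pairwise (· ≤ ·) :=
      hi.sublist (List.dropWhile_sublist _)
    have ihx := ih (imps.dropWhile (fun i => decide (i < m))) hrest hi'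
    unfold pvMergeScan
    constructor
    · intro h
      split at h
      · rename_i hcond
        rcases List.mem_cons.mp h with rfl | h'
        · refine ⟨List.mem_cons_self, ?_, ?_⟩
          · intro hmem
            exact hcond.1 ((head_dropWhile_eq_iff_mem imps x hi).mpr hmem)
          · simpa using hcond.2
        · obtain ⟨h1, h2, h3⟩ := ihx.mp h'
          exact ⟨List.mem_cons_of_mem m h1, fun hmem =>
            h2 ((mem_dropWhile_of_le imps m x (le_of_lt (hmlt x h1))).mpr hmem), h3⟩
      · obtain ⟨h1, h2, h3⟩ := ihx.mp h
        exact ⟨List.mem_cons_of_mem m h1, fun hmem =>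
          h2 ((mem_dropWhile_of_le imps m x (le_of_lt (hmlt x h1))).mpr hmem), h3⟩
    · rintro ⟨h1, h2, h3⟩
      rcases List.mem_cons.mp h1 with rfl | h1'
      · have hhead : (imps.dropWhile (fun i => decide (i < x))).head? ≠ some x := fun hh =>
          h2 ((head_dropWhile_eq_iff_mem imps x hi).mp hh)
        rw [if_pos ⟨hhead, by simpa using h3⟩]
        exact List.mem_cons_self
      · have hx' : x ∉ imps.dropWhile (fun i => decide (i < m)) := fun hmem =>
          h2 ((List.dropWhile_sublist _).mem hmem)
        have hmem' := ihx.mpr ⟨h1', hx', h3⟩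
        split
        · exact List.mem_cons_of_mem m hmem'
        · exact hmem'

-- ===== VERDICT (by name: the statement is the Claim_ definition above) =====
theorem find_unused_modules_spec : Claim_equal_find_unused_modules := by
  intro modules all_imports _ _
  unfold Spec_find_unused_modules
  -- write out each port's result (rfl through the lets)
  have hA : find_unused_modules modules all_imports =
      PySem.List.sorted (PySem.Set.ofList
        (((PySem.Set.ofList (modules.map (fun p => p.1))).diff
          (modules.foldl (fun used p => (pvImps p).foldl
            (fun used imp => if PySem.Set.contains (PySem.Set.ofList (modules.map (fun p => p.1))) imp
              then PySem.Set.add used imp else used) used) PySem.Set.empty)).filter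
          (fun m => !(pvEntrySuffixes.any (fun x => PySem.Str.endswith m x)))))
        (fun x => x) false := rfl
  have hB : find_unused_modules_alt modules all_imports =
      pvMergeScan (PySem.List.sorted (PySem.Set.ofList (modules.map (fun p => p.1))) (fun x => x) false)
        (PySem.List.sorted (PySem.Set.ofList (modules.flatMap pvImps)) (fun x => x) false) := rfl
  rw [hA, hB]
  set names := PySem.List.sorted (PySem.Set.ofList (modules.map (fun p => p.1))) (fun x : String => x) false with hnames
  set imps := PySem.List.sorted (PySem.Set.ofList (modules.flatMap pvImps)) (fun x : String => x) false with himps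
  have hnlt : names.Pairwise (· < ·) := PySem.List.sorted_ofList_pairwise_lt _
  have hilt : imps.Pairwise (· < ·) := PySem.List.sorted_ofList_pairwise_lt _
  have hile : imps.Pairwise (· ≤ ·) := hilt.imp le_of_lt
  have hblt : (pvMergeScan names imps).Pairwise (· < ·) := hnlt.sublist (mergeScan_sublist names imps)
  apply PySem.List.sorted_eq_of_perm_of_pairwise_lt _ _ _ ?_ hblt
  have hbnd : (pvMergeScan names imps).Nodup := hblt.nodup
  rw [List.perm_ext_iff_of_nodup hbnd (PySem.Set.nodup_ofList _)]
  intro x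
  rw [mem_mergeScan names imps hnlt hile x]
  have hxnames : x ∈ names ↔ x ∈ modules.map (fun p => p.1) := by
    rw [hnames, PySem.List.mem_sorted, PySem.Set.mem_ofList]
  have hximps : x ∈ imps ↔ ∃ p ∈ modules, x ∈ pvImps p := by
    rw [himps, PySem.List.mem_sorted, PySem.Set.mem_ofList, List.mem_flatMap]
  have hused := mem_used_foldl (PySem.Set.ofList (modules.map (fun p => p.1))) modules PySem.Set.empty x
  simp only [PySem.Set.mem_ofList] at hused
  rw [hxnames, hximps]
  simp only [PySem.Set.mem_ofList, List.mem_filter, PySem.Set.mem_diff, hused]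
  constructor
  · rintro ⟨h1, h2, h3⟩
    refine ⟨⟨h1, ?_⟩, ?_⟩
    · intro hu
      rcases hu with hu | hu
      · exact absurd hu (by simp [PySem.Set.empty])
      · exact h2 hu.1
    · simpa using h3
  · rintro ⟨⟨h1, h2⟩, h3⟩
    refine ⟨h1, ?_, ?_⟩
    · intro hex
      exact h2 (Or.inr ⟨hex, h1⟩)
    · simpa using h3
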